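-- pv_equiv track=rewrite | github.com/JesseHolwell/the-farmer-was-replaced | MProduceBone.py | tryStraightPath
-- ===== SOURCE A (Python) =====
-- def tryStraightPath(start, target, blocked, worldSize):
-- 	sx, sy = start
-- 	tx, ty = target
--
-- 	if sx == tx and sy == ty:
-- 		return []
--
-- 	stepX = 0
-- 	if tx > sx:
-- 		stepX = 1
-- 	elif tx < sx:
-- 		stepX = -1
--
-- 	stepY = 0
-- 	if ty > sy:
-- 		stepY = 1
-- 	elif ty < sy:
-- 		stepY = -1
--
-- 	dx = abs(tx - sx)
-- 	dy = abs(ty - sy)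
--
-- 	# X-first variant.
-- 	path = []
-- 	cx = sx
-- 	cy = sy
-- 	ok = True
-- 	for i in range(dx):
-- 		cx = cx + stepX
-- 		cell = (cx, cy)
-- 		if cell != target and cell in blocked:
-- 			ok = False
-- 			break
-- 		path.append((stepX, 0))
-- 	if ok:
-- 		for i in range(dy):
-- 			cy = cy + stepY
-- 			cell = (cx, cy)
-- 			if cell != target and cell in blocked:
-- 				ok = False
-- 				break
-- 			path.append((0, stepY))
-- 		if ok:
-- 			return path
--
-- 	# Y-first variant.
-- 	path = []
-- 	cx = sx
-- 	cy = sy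
-- 	ok = True
-- 	for i in range(dy):
-- 		cy = cy + stepY
-- 		cell = (cx, cy)
-- 		if cell != target and cell in blocked:
-- 			ok = False
-- 			break
-- 		path.append((0, stepY))
-- 	if ok:
-- 		for i in range(dx):
-- 			cx = cx + stepX
-- 			cell = (cx, cy)
-- 			if cell != target and cell in blocked:
-- 				ok = False
-- 				break
-- 			path.append((stepX, 0))
-- 		if ok:
-- 			return path
--
-- 	return None
-- ===== SOURCE B (Python) =====
-- def tryStraightPath(start, target, blocked, worldSize):
--     # One pass over the BLOCKED list (not over the path cells): classify each
--     # blocked cell geometrically against the two L-shaped corridors.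
--     sx, sy = start
--     tx, ty = target
--     if (sx, sy) == (tx, ty):
--         return []
--
--     lox, hix = min(sx, tx), max(sx, tx)
--     loy, hiy = min(sy, ty), max(sy, ty)
--
--     def on_h(row, bx, by):
--         # cells of a horizontal run on `row`: x strictly past sx up to tx
--         return by == row and lox <= bx <= hix and bx != sx
--
--     def on_v(col, bx, by):
--         # cells of a vertical run on `col`: y strictly past sy up to ty
--         return bx == col and loy <= by <= hiy and by != sy
--
--     badX = badY = False
--     for b in blocked:
--         if b == target:
--             continue
--         bx, by = b
--         badX = badX or on_h(sy, bx, by) or on_v(tx, bx, by)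
--         badY = badY or on_v(sx, bx, by) or on_h(ty, bx, by)
--
--     stepX = (tx > sx) - (tx < sx)
--     stepY = (ty > sy) - (ty < sy)
--     dx = abs(tx - sx)
--     dy = abs(ty - sy)
--     if not badX:
--         return [(stepX, 0)] * dx + [(0, stepY)] * dy
--     if not badY:
--         return [(0, stepY)] * dy + [(stepX, 0)] * dx
--     return None
-- ===== Notes on version B (the rewrite author's own statement) =====
-- stated objective: faster
-- what changed: A walks each L-shaped corridor cell by cell, testing every visited cell against the blocked list (two duplicated break-on-blocked loop pairs); B never walks the path: it makes ONE pass over the blocked list, classifying each blocked cell geometrically (interval conditions) against the four corridor segments into two flags badX/badY, then emits the chosen path by list repetition.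
import Mathlib
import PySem

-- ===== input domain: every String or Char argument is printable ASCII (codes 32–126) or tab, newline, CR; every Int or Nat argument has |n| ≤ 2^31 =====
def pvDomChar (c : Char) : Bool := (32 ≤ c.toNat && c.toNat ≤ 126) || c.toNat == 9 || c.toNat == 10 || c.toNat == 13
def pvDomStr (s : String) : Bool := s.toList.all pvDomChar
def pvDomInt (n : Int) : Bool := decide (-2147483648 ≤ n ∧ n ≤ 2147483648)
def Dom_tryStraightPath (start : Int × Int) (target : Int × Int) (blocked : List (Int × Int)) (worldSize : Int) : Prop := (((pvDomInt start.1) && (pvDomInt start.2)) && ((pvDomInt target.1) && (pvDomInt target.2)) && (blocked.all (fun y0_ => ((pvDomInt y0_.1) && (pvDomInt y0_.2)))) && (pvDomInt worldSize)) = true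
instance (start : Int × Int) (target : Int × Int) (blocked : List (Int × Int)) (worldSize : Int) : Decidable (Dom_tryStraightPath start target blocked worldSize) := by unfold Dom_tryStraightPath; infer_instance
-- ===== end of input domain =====

-- B replaces A's two cell-by-cell corridor walks by a single pass over the blocked list that
-- classifies each blocked cell geometrically against the corridor segments (objective: faster).


-- ===== PORT A =====
-- 'for i in range(dx): cx = cx + stepX; …' with break: state (cx, cy, path, ok); break = stop with ok = false.
-- path.append(d) is ported as cons onto a reversed accumulator (amortized O(1), like Python's append);
-- the caller reverses the accumulator, so the returned list is exactly Python's path.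
def pvALoopX (target : Int × Int) (blocked : List (Int × Int)) (stepX : Int) :
    Nat → Int → Int → List (Int × Int) → Int × Int × List (Int × Int) × Bool
  | 0, cx, cy, path => (cx, cy, path, true)
  | n + 1, cx, cy, path =>
      let cx' := cx + stepX
      let cell := (cx', cy)
      if cell ≠ target ∧ cell ∈ blocked then (cx', cy, path, false)
      else pvALoopX target blocked stepX n cx' cy ((stepX, 0) :: path)

def pvALoopY (target : Int × Int) (blocked : List (Int × Int)) (stepY : Int) :
    Nat → Int → Int → List (Int × Int) → Int × Int × List (Int × Int) × Bool
  | 0, cx, cy, path => (cx, cy, path, true)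
  | n + 1, cx, cy, path =>
      let cy' := cy + stepY
      let cell := (cx, cy')
      if cell ≠ target ∧ cell ∈ blocked then (cx, cy', path, false)
      else pvALoopY target blocked stepY n cx cy' ((0, stepY) :: path)

def tryStraightPath (start : Int × Int) (target : Int × Int) (blocked : List (Int × Int)) (worldSize : Int) : Option (List (Int × Int)) :=
  let sx := start.1; let sy := start.2
  let tx := target.1; let ty := target.2
  if sx = tx ∧ sy = ty then some [] else
  let stepX : Int := if tx > sx then 1 else if tx < sx then -1 else 0
  let stepY : Int := if ty > sy then 1 else if ty < sy then -1 else 0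
  let dx := (tx - sx).natAbs
  let dy := (ty - sy).natAbs
  -- X-first variant.
  let r1 := pvALoopX target blocked stepX dx sx sy []
  let rX :=
    if r1.2.2.2 then
      let r2 := pvALoopY target blocked stepY dy r1.1 r1.2.1 r1.2.2.1
      if r2.2.2.2 then some r2.2.2.1.reverse else none
    else none
  match rX with
  | some p => some p
  | none =>
      -- Y-first variant.
      let r3 := pvALoopY target blocked stepY dy sx sy []
      if r3.2.2.2 then
        let r4 := pvALoopX target blocked stepX dx r3.1 r3.2.1 r3.2.2.1
        if r4.2.2.2 then some r4.2.2.1.reverse else none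
      else none

-- ===== PORT B =====
-- Source B's on_h: is the blocked cell on the horizontal run at `row` (x strictly past sx up to tx)?
def pvSegH (sx tx row : Int) (b : Int × Int) : Bool :=
  b.2 == row && decide (min sx tx ≤ b.1) && decide (b.1 ≤ max sx tx) && b.1 != sx

-- Source B's on_v: is the blocked cell on the vertical run at `col` (y strictly past sy up to ty)?
def pvSegV (sy ty col : Int) (b : Int × Int) : Bool :=
  b.1 == col && decide (min sy ty ≤ b.2) && decide (b.2 ≤ max sy ty) && b.2 != sy

-- Source B's single for-loop over blocked accumulating (badX, badY); 'continue' on b == target.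
def pvBScan (target : Int × Int) (pX pY : Int × Int → Bool) (bl : List (Int × Int)) : Bool × Bool :=
  bl.foldl (fun st b => if b == target then st else (st.1 || pX b, st.2 || pY b)) (false, false)

def tryStraightPath_alt (start : Int × Int) (target : Int × Int) (blocked : List (Int × Int)) (worldSize : Int) : Option (List (Int × Int)) :=
  let sx := start.1; let sy := start.2
  let tx := target.1; let ty := target.2
  if sx = tx ∧ sy = ty then some [] else
  let bad := pvBScan target
    (fun b => pvSegH sx tx sy b || pvSegV sy ty tx b)
    (fun b => pvSegV sy ty sx b || pvSegH sx tx ty b) blocked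
  let stepX : Int := (if tx > sx then 1 else 0) - (if tx < sx then 1 else 0)
  let stepY : Int := (if ty > sy then 1 else 0) - (if ty < sy then 1 else 0)
  let dx := (tx - sx).natAbs
  let dy := (ty - sy).natAbs
  if !bad.1 then some (List.replicate dx (stepX, 0) ++ List.replicate dy (0, stepY))
  else if !bad.2 then some (List.replicate dy (0, stepY) ++ List.replicate dx (stepX, 0))
  else none

-- ===== PRECONDITION & SPEC =====
def Spec_tryStraightPath (start : Int × Int) (target : Int × Int) (blocked : List (Int × Int)) (worldSize : Int) (out : Option (List (Int × Int))) : Prop := out = tryStraightPath_alt start target blocked worldSize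
instance (start : Int × Int) (target : Int × Int) (blocked : List (Int × Int)) (worldSize : Int) (out : Option (List (Int × Int))) : Decidable (Spec_tryStraightPath start target blocked worldSize out) := by unfold Spec_tryStraightPath; infer_instance

-- ===== CLAIM (what is proved, stated in full; the proofs are below) =====
def Claim_equal_tryStraightPath : Prop := ∀ (start : Int × Int) (target : Int × Int) (blocked : List (Int × Int)) (worldSize : Int), Dom_tryStraightPath start target blocked worldSize → Spec_tryStraightPath start target blocked worldSize (tryStraightPath start target blocked worldSize)

-- ===== LEMMAS AND PROOFS =====

-- 'cell != target and cell in blocked' fails exactly when the cell is clear.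
def clearB (target : Int × Int) (blocked : List (Int × Int)) (c : Int × Int) : Bool :=
  c == target || !(blocked.contains c)

lemma clearB_false_iff (t : Int × Int) (b : List (Int × Int)) (c : Int × Int) :
    clearB t b c = false ↔ (c ≠ t ∧ c ∈ b) := by
  simp [clearB]

-- The cells visited by A's two kinds of loop.
def cellsX (s : Int) : Nat → Int → Int → List (Int × Int)
  | 0, _, _ => []
  | n + 1, cx, cy => (cx + s, cy) :: cellsX s n (cx + s) cy

def cellsY (s : Int) : Nat → Int → Int → List (Int × Int)
  | 0, _, _ => []
  | n + 1, cx, cy => (cx, cy + s) :: cellsY s n cx (cy + s)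

lemma loopX_flag (t : Int × Int) (b : List (Int × Int)) (s : Int) :
    ∀ (n : Nat) (cx cy : Int) (p : List (Int × Int)),
    (pvALoopX t b s n cx cy p).2.2.2 = (cellsX s n cx cy).all (clearB t b) := by
  intro n
  induction n with
  | zero => intro cx cy p; simp [pvALoopX, cellsX]
  | succ n ih =>
      intro cx cy p
      rw [pvALoopX, cellsX, List.all_cons]
      by_cases h : ((cx + s, cy) ≠ t ∧ (cx + s, cy) ∈ b)
      · simp [h, (clearB_false_iff t b _).2 h]
      · have hc : clearB t b (cx + s, cy) = true := by
          cases ht : clearB t b (cx + s, cy)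
          · exact absurd ((clearB_false_iff t b _).1 ht) h
          · rfl
        simp only [if_neg h, ih, hc, Bool.true_and]

lemma loopY_flag (t : Int × Int) (b : List (Int × Int)) (s : Int) :
    ∀ (n : Nat) (cx cy : Int) (p : List (Int × Int)),
    (pvALoopY t b s n cx cy p).2.2.2 = (cellsY s n cx cy).all (clearB t b) := by
  intro n
  induction n with
  | zero => intro cx cy p; simp [pvALoopY, cellsY]
  | succ n ih =>
      intro cx cy p
      rw [pvALoopY, cellsY, List.all_cons]
      by_cases h : ((cx, cy + s) ≠ t ∧ (cx, cy + s) ∈ b)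
      · simp [h, (clearB_false_iff t b _).2 h]
      · have hc : clearB t b (cx, cy + s) = true := by
          cases ht : clearB t b (cx, cy + s)
          · exact absurd ((clearB_false_iff t b _).1 ht) h
          · rfl
        simp only [if_neg h, ih, hc, Bool.true_and]

lemma loopX_val (t : Int × Int) (b : List (Int × Int)) (s : Int) :
    ∀ (n : Nat) (cx cy : Int) (p : List (Int × Int)),
    (cellsX s n cx cy).all (clearB t b) = true →
    pvALoopX t b s n cx cy p = (cx + n * s, cy, List.replicate n (s, 0) ++ p, true) := by
  intro n
  induction n with
  | zero => intro cx cy p _; simp [pvALoopX]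
  | succ n ih =>
      intro cx cy p hall
      rw [cellsX, List.all_cons, Bool.and_eq_true] at hall
      rw [pvALoopX, if_neg (fun hx => by simp [(clearB_false_iff t b _).2 hx] at hall)]
      rw [ih _ _ _ hall.2]
      simp only [List.replicate_succ', List.append_assoc, List.singleton_append,
        Prod.mk.injEq, and_true]
      push_cast; ring

lemma loopY_val (t : Int × Int) (b : List (Int × Int)) (s : Int) :
    ∀ (n : Nat) (cx cy : Int) (p : List (Int × Int)),
    (cellsY s n cx cy).all (clearB t b) = true →
    pvALoopY t b s n cx cy p = (cx, cy + n * s, List.replicate n (0, s) ++ p, true) := by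
  intro n
  induction n with
  | zero => intro cx cy p _; simp [pvALoopY]
  | succ n ih =>
      intro cx cy p hall
      rw [cellsY, List.all_cons, Bool.and_eq_true] at hall
      rw [pvALoopY, if_neg (fun hx => by simp [(clearB_false_iff t b _).2 hx] at hall)]
      rw [ih _ _ _ hall.2]
      simp only [List.replicate_succ', List.append_assoc, List.singleton_append,
        Prod.mk.injEq, true_and, and_true]
      push_cast; ring

-- membership in the visited-cell lists
lemma mem_cellsX (s : Int) :
    ∀ (n : Nat) (cx cy : Int) (c : Int × Int),
    c ∈ cellsX s n cx cy ↔ (c.2 = cy ∧ ∃ i : Nat, 1 ≤ i ∧ i ≤ n ∧ c.1 = cx + (i : Int) * s) := by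
  intro n
  induction n with
  | zero =>
      intro cx cy c
      simp only [cellsX, List.not_mem_nil, false_iff, not_and]
      rintro _ ⟨i, h1, h2, _⟩; omega
  | succ n ih =>
      intro cx cy c
      rw [cellsX, List.mem_cons, ih]
      constructor
      · rintro (rfl | ⟨h2, i, h1, hn, hx⟩)
        · exact ⟨rfl, 1, le_refl 1, by omega, by push_cast; ring⟩
        · exact ⟨h2, i + 1, by omega, by omega, by rw [hx]; push_cast; ring⟩
      · rintro ⟨h2, i, h1, hn, hx⟩
        rcases Nat.eq_or_lt_of_le h1 with h | h
        · left
          obtain ⟨c1, c2⟩ := c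
          simp only at h2 hx
          subst h2
          rw [hx, ← h]; norm_num
        · right
          refine ⟨h2, i - 1, by omega, by omega, ?_⟩
          rw [hx]
          have : ((i : Int)) = ((i - 1 : Nat) : Int) + 1 := by omega
          rw [this]; ring

lemma mem_cellsY (s : Int) :
    ∀ (n : Nat) (cx cy : Int) (c : Int × Int),
    c ∈ cellsY s n cx cy ↔ (c.1 = cx ∧ ∃ i : Nat, 1 ≤ i ∧ i ≤ n ∧ c.2 = cy + (i : Int) * s) := by
  intro n
  induction n with
  | zero =>
      intro cx cy c
      simp only [cellsY, List.not_mem_nil, false_iff, not_and]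
      rintro _ ⟨i, h1, h2, _⟩; omega
  | succ n ih =>
      intro cx cy c
      rw [cellsY, List.mem_cons, ih]
      constructor
      · rintro (rfl | ⟨h2, i, h1, hn, hx⟩)
        · exact ⟨rfl, 1, le_refl 1, by omega, by push_cast; ring⟩
        · exact ⟨h2, i + 1, by omega, by omega, by rw [hx]; push_cast; ring⟩
      · rintro ⟨h2, i, h1, hn, hx⟩
        rcases Nat.eq_or_lt_of_le h1 with h | h
        · left
          obtain ⟨c1, c2⟩ := c
          simp only at h2 hx
          subst h2
          rw [hx, ← h]; norm_num
        · right
          refine ⟨h2, i - 1, by omega, by omega, ?_⟩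
          rw [hx]
          have : ((i : Int)) = ((i - 1 : Nat) : Int) + 1 := by omega
          rw [this]; ring

-- the geometric interval condition matches the strided-index description (sign-form step)
lemma interval_iff (sx tx x : Int) :
    (∃ i : Nat, 1 ≤ i ∧ i ≤ (tx - sx).natAbs ∧
      x = sx + (i : Int) * ((if tx > sx then 1 else 0) - (if tx < sx then 1 else 0)))
    ↔ (min sx tx ≤ x ∧ x ≤ max sx tx ∧ x ≠ sx) := by
  rcases lt_trichotomy sx tx with h | h | h
  · rw [if_pos h, if_neg (by omega)]
    constructor
    · rintro ⟨i, h1, hn, rfl⟩; simp only [mul_sub, mul_one, mul_zero, sub_zero]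
      constructor
      · omega
      · constructor <;> omega
    · rintro ⟨hlo, hhi, hne⟩
      refine ⟨(x - sx).toNat, by omega, by omega, by omega⟩
  · subst h
    constructor
    · rintro ⟨i, h1, hn, _⟩; omega
    · rintro ⟨hlo, hhi, hne⟩; omega
  · rw [if_neg (by omega), if_pos h]
    constructor
    · rintro ⟨i, h1, hn, rfl⟩
      have : (i : Int) * ((0 : Int) - 1) = -(i : Int) := by ring
      rw [this]
      constructor
      · omega
      · constructor <;> omega
    · rintro ⟨hlo, hhi, hne⟩
      refine ⟨(sx - x).toNat, by omega, by omega, ?_⟩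
      have h2 : ((sx - x).toNat : Int) = sx - x := by omega
      rw [h2]; ring

-- pvSegH/pvSegV characterize membership in the corridor cell lists
lemma segH_mem (sx tx y0 : Int) (c : Int × Int) :
    pvSegH sx tx y0 c =
      decide (c ∈ cellsX ((if tx > sx then 1 else 0) - (if tx < sx then 1 else 0))
        (tx - sx).natAbs sx y0) := by
  rw [Bool.eq_iff_iff]
  simp only [pvSegH, Bool.and_eq_true, beq_iff_eq, bne_iff_ne, decide_eq_true_eq,
    mem_cellsX, interval_iff]
  tauto

lemma segV_mem (sy ty x0 : Int) (c : Int × Int) :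
    pvSegV sy ty x0 c =
      decide (c ∈ cellsY ((if ty > sy then 1 else 0) - (if ty < sy then 1 else 0))
        (ty - sy).natAbs x0 sy) := by
  rw [Bool.eq_iff_iff]
  simp only [pvSegV, Bool.and_eq_true, beq_iff_eq, bne_iff_ne, decide_eq_true_eq,
    mem_cellsY, interval_iff]
  tauto

-- the scan is the pair of anys over blocked
lemma scan_eq (t : Int × Int) (pX pY : Int × Int → Bool) (bl : List (Int × Int)) :
    pvBScan t pX pY bl =
      (bl.any (fun b => !(b == t) && pX b), bl.any (fun b => !(b == t) && pY b)) := by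
  have key : ∀ (bl : List (Int × Int)) (st : Bool × Bool),
      bl.foldl (fun st b => if b == t then st else (st.1 || pX b, st.2 || pY b)) st =
        (st.1 || bl.any (fun b => !(b == t) && pX b), st.2 || bl.any (fun b => !(b == t) && pY b)) := by
    intro bl
    induction bl with
    | nil => intro st; simp
    | cons b rest ih =>
        intro st
        rw [List.foldl_cons, List.any_cons, List.any_cons, ih]
        by_cases hb : b = t
        · simp [hb]
        · have hbt : (b == t) = false := by simp [hb]
          simp [hbt, Bool.or_assoc]
  rw [pvBScan, key]; simp

-- any over blocked = failure of all-clear over the corridor's cell list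
lemma any_eq_not_all (t : Int × Int) (bl cells : List (Int × Int)) (seg : Int × Int → Bool)
    (hmem : ∀ c, seg c = decide (c ∈ cells)) :
    bl.any (fun b => !(b == t) && seg b) = !(cells.all (clearB t bl)) := by
  rw [Bool.eq_iff_iff]
  simp only [List.any_eq_true, Bool.and_eq_true, Bool.not_eq_true', beq_eq_false_iff_ne,
    hmem, decide_eq_true_eq, Bool.not_eq_true, List.all_eq_false]
  constructor
  · rintro ⟨b, hbl, hne, hc⟩
    exact ⟨b, hc, (clearB_false_iff t bl b).2 ⟨hne, hbl⟩⟩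
  · rintro ⟨c, hc, hfail⟩
    obtain ⟨hne, hm⟩ := (clearB_false_iff t bl c).1 hfail
    exact ⟨c, hm, hne, hc⟩

-- ===== VERDICT (by name: the statement is the Claim_ definition above) =====
theorem tryStraightPath_spec : Claim_equal_tryStraightPath := by
  intro start target blocked worldSize _hdom
  unfold Spec_tryStraightPath
  obtain ⟨sx, sy⟩ := start
  obtain ⟨tx, ty⟩ := target
  by_cases h0 : sx = tx ∧ sy = ty
  · simp [tryStraightPath, tryStraightPath_alt, h0.1, h0.2]
  · set sX : Int := (if tx > sx then 1 else 0) - (if tx < sx then 1 else 0) with hsX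
    set sY : Int := (if ty > sy then 1 else 0) - (if ty < sy then 1 else 0) with hsY
    have hstepX : (if tx > sx then (1:Int) else if tx < sx then -1 else 0) = sX := by
      rw [hsX]; split_ifs <;> omega
    have hstepY : (if ty > sy then (1:Int) else if ty < sy then -1 else 0) = sY := by
      rw [hsY]; split_ifs <;> omega
    set dxN : Nat := (tx - sx).natAbs with hdxN
    set dyN : Nat := (ty - sy).natAbs with hdyN
    have hend : sx + (dxN : Int) * sX = tx := by
      rw [hdxN, hsX]; split_ifs <;> omega
    have hendY : sy + (dyN : Int) * sY = ty := by
      rw [hdyN, hsY]; split_ifs <;> omega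
    set clB := clearB (tx, ty) blocked with hclB
    set a1 := (cellsX sX dxN sx sy).all clB with ha1
    set a2 := (cellsY sY dyN tx sy).all clB with ha2
    set a3 := (cellsY sY dyN sx sy).all clB with ha3
    set a4 := (cellsX sX dxN sx ty).all clB with ha4
    -- B reduces to the decision tree over a1..a4
    have hB : tryStraightPath_alt (sx, sy) (tx, ty) blocked worldSize =
        (if a1 && a2 then
          some (List.replicate dxN (sX, 0) ++ List.replicate dyN (0, sY))
        else if a3 && a4 then
          some (List.replicate dyN (0, sY) ++ List.replicate dxN (sX, 0))
        else none) := by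
      show (if sx = tx ∧ sy = ty then some [] else _) = _
      rw [if_neg h0]
      rw [scan_eq]
      have e1 : (blocked.any fun b => !(b == (tx, ty)) && (pvSegH sx tx sy b || pvSegV sy ty tx b))
          = !(a1 && a2) := by
        rw [ha1, ha2, hclB, ← List.all_append]
        refine any_eq_not_all (tx, ty) blocked _ _ (fun c => ?_)
        rw [Bool.eq_iff_iff]
        simp only [segH_mem, segV_mem, ← hsX, ← hsY, ← hdxN, ← hdyN,
          Bool.or_eq_true, decide_eq_true_eq, List.mem_append]
      have e2 : (blocked.any fun b => !(b == (tx, ty)) && (pvSegV sy ty sx b || pvSegH sx tx ty b))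
          = !(a3 && a4) := by
        rw [ha3, ha4, hclB, ← List.all_append]
        refine any_eq_not_all (tx, ty) blocked _ _ (fun c => ?_)
        rw [Bool.eq_iff_iff]
        simp only [segV_mem, segH_mem, ← hsX, ← hsY, ← hdxN, ← hdyN,
          Bool.or_eq_true, decide_eq_true_eq, List.mem_append]
      simp only [e1, e2, Bool.not_not, ← hsX, ← hsY, ← hdxN, ← hdyN]
    rw [hB]
    -- A reduces to the same tree
    show (if sx = tx ∧ sy = ty then some [] else _) = _
    rw [if_neg h0, hstepX, hstepY]
    simp only [← hdxN, ← hdyN]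
    have hf1 : (pvALoopX (tx, ty) blocked sX dxN sx sy []).2.2.2 = a1 := loopX_flag _ _ _ _ _ _ _
    cases ca1 : a1 with
    | false =>
        rw [ca1] at hf1
        simp only [hf1, if_false, Bool.false_and]
        have hf3 : (pvALoopY (tx, ty) blocked sY dyN sx sy []).2.2.2 = a3 := loopY_flag _ _ _ _ _ _ _
        cases ca3 : a3 with
        | false => rw [ca3] at hf3; simp [hf3]
        | true =>
            rw [ca3] at hf3
            have hv3 := loopY_val (tx, ty) blocked sY dyN sx sy [] (by rw [← ha3]; exact ca3)
            simp only [hf3, if_true, hv3, hendY, List.append_nil]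
            have hf4 : (pvALoopX (tx, ty) blocked sX dxN sx ty (List.replicate dyN (0, sY))).2.2.2 = a4 :=
              loopX_flag _ _ _ _ _ _ _
            cases ca4 : a4 with
            | false => rw [ca4] at hf4; simp [hf4]
            | true =>
                rw [ca4] at hf4
                have hv4 := loopX_val (tx, ty) blocked sX dxN sx ty (List.replicate dyN (0, sY))
                  (by rw [← ha4]; exact ca4)
                simp [hf4, hv4, List.reverse_append, List.reverse_replicate]
    | true =>
        rw [ca1] at hf1
        have hv1 := loopX_val (tx, ty) blocked sX dxN sx sy [] (by rw [← ha1]; exact ca1)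
        simp only [hf1, if_true, hv1, hend, List.append_nil]
        have hf2 : (pvALoopY (tx, ty) blocked sY dyN tx sy (List.replicate dxN (sX, 0))).2.2.2 = a2 :=
          loopY_flag _ _ _ _ _ _ _
        cases ca2 : a2 with
        | true =>
            rw [ca2] at hf2
            have hv2 := loopY_val (tx, ty) blocked sY dyN tx sy (List.replicate dxN (sX, 0))
              (by rw [← ha2]; exact ca2)
            simp [hf2, hv2, List.reverse_append, List.reverse_replicate]
        | false =>
            rw [ca2] at hf2
            simp only [hf2, if_false, Bool.and_false]
            have hf3 : (pvALoopY (tx, ty) blocked sY dyN sx sy []).2.2.2 = a3 := loopY_flag _ _ _ _ _ _ _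
            cases ca3 : a3 with
            | false => rw [ca3] at hf3; simp [hf3]
            | true =>
                rw [ca3] at hf3
                have hv3 := loopY_val (tx, ty) blocked sY dyN sx sy [] (by rw [← ha3]; exact ca3)
                simp only [hf3, if_true, hv3, hendY, List.append_nil]
                have hf4 : (pvALoopX (tx, ty) blocked sX dxN sx ty (List.replicate dyN (0, sY))).2.2.2 = a4 :=
                  loopX_flag _ _ _ _ _ _ _
                cases ca4 : a4 with
                | false => rw [ca4] at hf4; simp [hf4]
                | true =>
                    rw [ca4] at hf4
                    have hv4 := loopX_val (tx, ty) blocked sX dxN sx ty (List.replicate dyN (0, sY))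
                      (by rw [← ha4]; exact ca4)
                    simp [hf4, hv4, List.reverse_append, List.reverse_replicate]
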